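-- pv_equiv track=rewrite | github.com/BartoszGondek/prg-basics | 04-Functions/7-18.py | f
-- ===== SOURCE A (Python) =====
-- def f(number):
--     sum = 0
--     str_number = str(number)
--
--     for char in range(1, 10):
--         count = 0
--         for digit in str_number:
--             if digit == str(char):
--                 count += 1
--         if count > 1:
--             sum += char * count
--     return sum
-- ===== SOURCE B (Python) =====
-- def f(number):
--     def go(s):
--         if not s:
--             return 0
--         c = s[0]
--         run = s.count(c)
--         rest = [x for x in s if x != c]
--         if run > 1 and '1' <= c <= '9':
--             return (ord(c) - ord('0')) * run + go(rest)
--         return go(rest)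
--     return go(list(str(number)))
-- ===== Notes on version B (the rewrite author's own statement) =====
-- stated objective: alternative
-- what changed: Instead of scanning the decimal string once per digit of the fixed digit range, B recursively partitions the character list by its first character: count that character, add its contribution if it is a repeated nonzero digit, filter it out, and recurse on the remainder, so the traversal follows the distinct characters of the input.
import Mathlib
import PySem

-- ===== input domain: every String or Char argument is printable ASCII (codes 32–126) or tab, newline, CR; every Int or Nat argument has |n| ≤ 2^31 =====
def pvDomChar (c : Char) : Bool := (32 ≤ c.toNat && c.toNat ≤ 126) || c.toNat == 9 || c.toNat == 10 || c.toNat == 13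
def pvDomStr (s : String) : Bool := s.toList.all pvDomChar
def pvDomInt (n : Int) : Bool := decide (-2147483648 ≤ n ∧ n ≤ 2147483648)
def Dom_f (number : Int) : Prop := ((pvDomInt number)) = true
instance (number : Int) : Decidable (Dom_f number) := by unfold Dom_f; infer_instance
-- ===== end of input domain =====

-- B replaces A's per-digit scans of the decimal string with a recursion that partitions the
-- character list by its first character (count it, filter it out, recurse); objective: alternative.

-- ===== PORT A =====
def f (number : Int) : Int :=
  let str_number := (PySem.Int.toStr number).toList
  (PySem.List.pyRange 1 10 1).foldl (fun sum char =>
    let count : Int := str_number.foldl (fun count digit =>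
      if [digit] = (PySem.Int.toStr char).toList then count + 1 else count) 0
    if count > 1 then sum + char * count else sum) 0

-- ===== PORT B =====
-- go(s): count s's first character, add its contribution if it is a repeated digit 1-9,
-- then recurse on s with that character filtered out.
def fAltGo : List Char → Int
  | [] => 0
  | c :: xs =>
    let run : Int := ((c :: xs).count c : Int)
    let rest := (c :: xs).filter (fun x => x ≠ c)
    if run > 1 ∧ '1' ≤ c ∧ c ≤ '9' then ((c.toNat : Int) - 48) * run + fAltGo rest
    else fAltGo rest
termination_by l => l.length
decreasing_by
  all_goals
    simp only [List.filter_cons, ne_eq, not_true_eq_false, decide_false, Bool.false_eq_true,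
      if_false, List.length_cons]
    exact Nat.lt_succ_of_le (List.length_filter_le _ _)

def f_alt (number : Int) : Int :=
  fAltGo (PySem.Int.toStr number).toList

-- ===== PRECONDITION & SPEC =====
def Spec_f (number : Int) (out : Int) : Prop := out = f_alt number
instance (number : Int) (out : Int) : Decidable (Spec_f number out) := by unfold Spec_f; infer_instance

-- ===== CLAIM (what is proved, stated in full; the proofs are below) =====
def Claim_equal_f : Prop := ∀ (number : Int), Dom_f number → Spec_f number (f number)

-- ===== LEMMAS AND PROOFS =====

-- per-digit contribution, as a function of the multiset of characters only
def pvContrib (c : Char) (k : Int) : Int :=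
  if k > 1 ∧ '1' ≤ c ∧ c ≤ '9' then ((c.toNat : Int) - 48) * k else 0

def pvS (s : List Char) : Int :=
  (['1','2','3','4','5','6','7','8','9'].map (fun d => pvContrib d (s.count d))).sum

theorem count_loop (s : List Char) (c : Char) :
    s.foldl (fun count digit => if [digit] = [c] then count + 1 else count) (0 : Int)
      = (s.count c : Int) := by
  have aux : ∀ (t : List Char) (n : Int),
      t.foldl (fun count digit => if digit = c then count + 1 else count) n
        = n + (t.count c : Int) := by
    intro t
    induction t with
    | nil => intro n; simp
    | cons x xs ih =>
        intro n
        by_cases h : x = c <;> simp [List.foldl, h, ih] <;> push_cast <;> ring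
  simp only [List.cons.injEq, and_true]
  rw [aux]
  simp

theorem foldl_A (l : List Int) (g : Int → Int) (a : Int) :
    l.foldl (fun sum char =>
      let count : Int := g char
      if count > 1 then sum + char * count else sum) a
    = a + (l.map (fun char => if g char > 1 then char * g char else 0)).sum := by
  induction l generalizing a with
  | nil => simp
  | cons x xs ih =>
    simp only [List.foldl, List.map_cons, List.sum_cons, ih]
    split_ifs <;> ring

theorem contrib_digit (c : Char) (h1 : '1' ≤ c) (h2 : c ≤ '9') (k : Int) :
    pvContrib c k = if k > 1 then ((c.toNat : Int) - 48) * k else 0 := by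
  simp [pvContrib, h1, h2]

theorem A_eq (s : List Char) :
    (PySem.List.pyRange 1 10 1).foldl (fun sum char =>
      let count : Int := s.foldl (fun count digit =>
        if [digit] = (PySem.Int.toStr char).toList then count + 1 else count) 0
      if count > 1 then sum + char * count else sum) 0 = pvS s := by
  rw [show PySem.List.pyRange 1 10 1 = [1,2,3,4,5,6,7,8,9] from by decide]
  rw [foldl_A]
  simp only [List.map_cons, List.map_nil, List.sum_cons, List.sum_nil]
  rw [show (PySem.Int.toStr 1).toList = ['1'] from by decide,
      show (PySem.Int.toStr 2).toList = ['2'] from by decide,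
      show (PySem.Int.toStr 3).toList = ['3'] from by decide,
      show (PySem.Int.toStr 4).toList = ['4'] from by decide,
      show (PySem.Int.toStr 5).toList = ['5'] from by decide,
      show (PySem.Int.toStr 6).toList = ['6'] from by decide,
      show (PySem.Int.toStr 7).toList = ['7'] from by decide,
      show (PySem.Int.toStr 8).toList = ['8'] from by decide,
      show (PySem.Int.toStr 9).toList = ['9'] from by decide]
  simp only [count_loop]
  simp only [pvS, List.map_cons, List.map_nil, List.sum_cons, List.sum_nil,
    contrib_digit '1' (by decide) (by decide), contrib_digit '2' (by decide) (by decide),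
    contrib_digit '3' (by decide) (by decide), contrib_digit '4' (by decide) (by decide),
    contrib_digit '5' (by decide) (by decide), contrib_digit '6' (by decide) (by decide),
    contrib_digit '7' (by decide) (by decide), contrib_digit '8' (by decide) (by decide),
    contrib_digit '9' (by decide) (by decide),
    show ((('1' : Char).toNat : Int)) = 49 from by decide,
    show ((('2' : Char).toNat : Int)) = 50 from by decide,
    show ((('3' : Char).toNat : Int)) = 51 from by decide,
    show ((('4' : Char).toNat : Int)) = 52 from by decide,
    show ((('5' : Char).toNat : Int)) = 53 from by decide,
    show ((('6' : Char).toNat : Int)) = 54 from by decide,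
    show ((('7' : Char).toNat : Int)) = 55 from by decide,
    show ((('8' : Char).toNat : Int)) = 56 from by decide,
    show ((('9' : Char).toNat : Int)) = 57 from by decide]
  norm_num

theorem count_filter_ne (s : List Char) (c d : Char) :
    (List.filter (fun x => !decide (x = c)) s).count d = if d = c then 0 else s.count d := by
  by_cases h : d = c
  · subst h
    simp [List.count_eq_zero, List.mem_filter]
  · rw [List.count_filter (by simp [h])]
    simp [h]

theorem contrib_zero (c : Char) : pvContrib c 0 = 0 := by simp [pvContrib]

theorem S_step (s : List Char) (c : Char) :
    pvS s = pvContrib c (s.count c) + pvS (List.filter (fun x => !decide (x = c)) s) := by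
  by_cases hc : '1' ≤ c ∧ c ≤ '9'
  · have h9 : c = '1' ∨ c = '2' ∨ c = '3' ∨ c = '4' ∨ c = '5' ∨ c = '6' ∨ c = '7' ∨ c = '8' ∨ c = '9' := by
      obtain ⟨h1, h2⟩ := hc
      have g1 : 49 ≤ c.toNat := by
        have := h1; simp [Char.le_def, UInt32.le_iff_toNat_le] at this; exact this
      have g2 : c.toNat ≤ 57 := by
        have := h2; simp [Char.le_def, UInt32.le_iff_toNat_le] at this; exact this
      have hv : c = Char.ofNat c.toNat := (Char.ofNat_toNat c).symm
      interval_cases h : c.toNat <;> subst hv <;> decide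
    rcases h9 with h|h|h|h|h|h|h|h|h <;> subst h <;>
      simp [pvS, count_filter_ne, contrib_zero] <;> ring_nf
  · have hz : ∀ k : Int, pvContrib c k = 0 := by intro k; simp [pvContrib, hc]
    have hne : ∀ d : Char, '1' ≤ d → d ≤ '9' → (d = c) = False := by
      intro d hd1 hd2
      simp only [eq_iff_iff, iff_false]
      intro he; exact hc (he ▸ ⟨hd1, hd2⟩)
    simp [pvS, count_filter_ne, hz,
      hne '1' (by decide) (by decide), hne '2' (by decide) (by decide),
      hne '3' (by decide) (by decide), hne '4' (by decide) (by decide),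
      hne '5' (by decide) (by decide), hne '6' (by decide) (by decide),
      hne '7' (by decide) (by decide), hne '8' (by decide) (by decide),
      hne '9' (by decide) (by decide)]

theorem go_eq (s : List Char) : fAltGo s = pvS s := by
  induction s using fAltGo.induct with
  | case1 => rw [fAltGo]; simp [pvS, contrib_zero]
  | case2 c xs run rest h ih =>
    rw [fAltGo]
    simp only [rest, ne_eq, decide_not] at ih
    rw [if_pos h]
    simp only [ne_eq, decide_not]
    rw [ih, S_step (c :: xs) c]
    have hp : pvContrib c (((c :: xs).count c : Nat) : Int)
        = ((c.toNat : Int) - 48) * (((c :: xs).count c : Nat) : Int) := by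
      simp only [pvContrib]; rw [if_pos h]
    rw [hp]
  | case3 c xs run rest h ih =>
    rw [fAltGo]
    simp only [rest, ne_eq, decide_not] at ih
    rw [if_neg h]
    simp only [ne_eq, decide_not]
    rw [ih, S_step (c :: xs) c]
    have hz : pvContrib c (((c :: xs).count c : Nat) : Int) = 0 := by
      simp only [pvContrib]
      rw [if_neg h]
    rw [hz]; ring

-- ===== VERDICT (by name: the statement is the Claim_ definition above) =====
theorem f_spec : Claim_equal_f := by
  intro number _
  unfold Spec_f f f_alt
  rw [go_eq, A_eq]
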